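-- pv_equiv track=rewrite | github.com/digital-garbage/ComfyUI-FunPack | conditioning.py | _infer_concept_category
-- ===== SOURCE A (Python) =====
-- def _infer_concept_category(phrase_words: list):
--     words = set(phrase_words or [])
--     if not words:
--         return "general"
--
--     category_terms = {
--         "quality": {"masterpiece", "best", "quality", "detailed", "highres", "high-res", "ultra", "perfect"},
--         "style": {"anime", "cinematic", "photorealistic", "painterly", "illustration", "stylized", "realistic", "film", "noir"},
--         "camera": {"closeup", "close-up", "wide", "shot", "angle", "zoom", "pan", "tracking", "dolly", "camera", "focus", "bokeh", "framing"},
--         "action": {"running", "walking", "flying", "jumping", "smiling", "turning", "dancing", "moving", "motion", "looking", "holding", "standing", "sitting"},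
--         "environment": {"forest", "city", "street", "room", "beach", "mountain", "temple", "sunset", "night", "rain", "snow", "sky", "background"},
--         "appearance": {"hair", "eyes", "dress", "jacket", "armor", "face", "skin", "beard", "smile", "pose", "outfit"},
--         "subject": {"girl", "boy", "woman", "man", "person", "character", "robot", "dragon", "cat", "dog", "bird", "child"},
--     }
--
--     best_category, best_score = "general", 0
--     for category, terms in category_terms.items():
--         score = len(words & terms)
--         if score > best_score:
--             best_category, best_score = category, score
--     return best_category
-- ===== SOURCE B (Python) =====
-- # Reverse index + one counting pass + builtin max (first argmax = A's tie-breaking).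
-- _CATEGORY_TERMS = {
--     "quality": {"masterpiece", "best", "quality", "detailed", "highres", "high-res", "ultra", "perfect"},
--     "style": {"anime", "cinematic", "photorealistic", "painterly", "illustration", "stylized", "realistic", "film", "noir"},
--     "camera": {"closeup", "close-up", "wide", "shot", "angle", "zoom", "pan", "tracking", "dolly", "camera", "focus", "bokeh", "framing"},
--     "action": {"running", "walking", "flying", "jumping", "smiling", "turning", "dancing", "moving", "motion", "looking", "holding", "standing", "sitting"},
--     "environment": {"forest", "city", "street", "room", "beach", "mountain", "temple", "sunset", "night", "rain", "snow", "sky", "background"},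
--     "appearance": {"hair", "eyes", "dress", "jacket", "armor", "face", "skin", "beard", "smile", "pose", "outfit"},
--     "subject": {"girl", "boy", "woman", "man", "person", "character", "robot", "dragon", "cat", "dog", "bird", "child"},
-- }
--
-- # Each term belongs to exactly one category, so a flat term -> category index is lossless.
-- _INDEX = {term: cat for cat, terms in _CATEGORY_TERMS.items() for term in terms}
--
-- # Candidates in A's fixed order, with "general" first so it wins all-zero ties.
-- _CHOICES = ["general", *_CATEGORY_TERMS]
--
--
-- def _infer_concept_category(phrase_words: list):
--     counts = {}
--     for w in set(phrase_words or []):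
--         cat = _INDEX.get(w)
--         if cat is not None:
--             counts[cat] = counts.get(cat, 0) + 1
--     return max(_CHOICES, key=lambda c: counts.get(c, 0))
-- ===== Notes on version B (the rewrite author's own statement) =====
-- stated objective: idiomatic
-- what changed: Replaces the per-category set intersections and the explicit best/score loop with a constant reverse index (term -> category, valid because the term sets are disjoint), one counting pass over the distinct words into a dict, and a single builtin max over ['general'] + categories keyed by count (Python's max returns the first argmax, matching A's strict-> tie-breaking, and 'general' first absorbs the all-zero case).
import Mathlib
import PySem

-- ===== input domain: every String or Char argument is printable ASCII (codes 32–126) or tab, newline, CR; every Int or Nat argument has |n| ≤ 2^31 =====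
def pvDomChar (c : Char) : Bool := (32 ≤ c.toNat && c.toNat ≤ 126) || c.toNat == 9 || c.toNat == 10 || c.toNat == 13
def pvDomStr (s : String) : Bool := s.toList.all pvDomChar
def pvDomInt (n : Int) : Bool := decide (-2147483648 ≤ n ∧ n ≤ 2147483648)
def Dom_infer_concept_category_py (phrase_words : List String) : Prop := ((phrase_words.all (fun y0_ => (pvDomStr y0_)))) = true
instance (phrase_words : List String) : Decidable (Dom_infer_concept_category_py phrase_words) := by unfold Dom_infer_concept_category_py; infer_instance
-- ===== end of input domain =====

-- B replaces A's per-category set intersections and best/score loop by a constant reverse index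
-- (term → category), one counting pass over the distinct words, and a single builtin max with a
-- count key over "general" :: categories (objective: idiomatic; same observable behaviour).

-- ===== PORT A =====
-- the category_terms dict of A, in insertion order; each value is a Python set literal (distinct elements)
def pvCategoryTerms : List (String × List String) := [
  ("quality", ["masterpiece", "best", "quality", "detailed", "highres", "high-res", "ultra", "perfect"]),
  ("style", ["anime", "cinematic", "photorealistic", "painterly", "illustration", "stylized", "realistic", "film", "noir"]),
  ("camera", ["closeup", "close-up", "wide", "shot", "angle", "zoom", "pan", "tracking", "dolly", "camera", "focus", "bokeh", "framing"]),
  ("action", ["running", "walking", "flying", "jumping", "smiling", "turning", "dancing", "moving", "motion", "looking", "holding", "standing", "sitting"]),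
  ("environment", ["forest", "city", "street", "room", "beach", "mountain", "temple", "sunset", "night", "rain", "snow", "sky", "background"]),
  ("appearance", ["hair", "eyes", "dress", "jacket", "armor", "face", "skin", "beard", "smile", "pose", "outfit"]),
  ("subject", ["girl", "boy", "woman", "man", "person", "character", "robot", "dragon", "cat", "dog", "bird", "child"])]

def infer_concept_category_py (phrase_words : List String) : String :=
  let words : PySem.Set String := PySem.Set.ofList phrase_words
  if words.isEmpty then "general"
  else
    (pvCategoryTerms.foldl (fun (b : String × Int) p =>
        let score : Int := ((PySem.Set.inter words p.2).length : Int)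
        if score > b.2 then (p.1, score) else b) ("general", 0)).1

-- ===== PORT B =====
-- Source B's module constant _INDEX = {term: cat for cat, terms in _CATEGORY_TERMS.items() for term in terms},
-- a dict computed once at import time, written out here as its value (flat term → category pairs)
def pvIndexPairs : List (String × String) := [
  ("masterpiece", "quality"), ("best", "quality"), ("quality", "quality"), ("detailed", "quality"), ("highres", "quality"), ("high-res", "quality"), ("ultra", "quality"), ("perfect", "quality"),
  ("anime", "style"), ("cinematic", "style"), ("photorealistic", "style"), ("painterly", "style"), ("illustration", "style"), ("stylized", "style"), ("realistic", "style"), ("film", "style"), ("noir", "style"),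
  ("closeup", "camera"), ("close-up", "camera"), ("wide", "camera"), ("shot", "camera"), ("angle", "camera"), ("zoom", "camera"), ("pan", "camera"), ("tracking", "camera"), ("dolly", "camera"), ("camera", "camera"), ("focus", "camera"), ("bokeh", "camera"), ("framing", "camera"),
  ("running", "action"), ("walking", "action"), ("flying", "action"), ("jumping", "action"), ("smiling", "action"), ("turning", "action"), ("dancing", "action"), ("moving", "action"), ("motion", "action"), ("looking", "action"), ("holding", "action"), ("standing", "action"), ("sitting", "action"),
  ("forest", "environment"), ("city", "environment"), ("street", "environment"), ("room", "environment"), ("beach", "environment"), ("mountain", "environment"), ("temple", "environment"), ("sunset", "environment"), ("night", "environment"), ("rain", "environment"), ("snow", "environment"), ("sky", "environment"), ("background", "environment"),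
  ("hair", "appearance"), ("eyes", "appearance"), ("dress", "appearance"), ("jacket", "appearance"), ("armor", "appearance"), ("face", "appearance"), ("skin", "appearance"), ("beard", "appearance"), ("smile", "appearance"), ("pose", "appearance"), ("outfit", "appearance"),
  ("girl", "subject"), ("boy", "subject"), ("woman", "subject"), ("man", "subject"), ("person", "subject"), ("character", "subject"), ("robot", "subject"), ("dragon", "subject"), ("cat", "subject"), ("dog", "subject"), ("bird", "subject"), ("child", "subject")]

def pvIndex : PySem.Dict String String := PySem.Dict.ofList pvIndexPairs

-- Source B's _CHOICES = ["general", *_CATEGORY_TERMS], again written out as its value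
def pvChoices : List String :=
  ["general", "quality", "style", "camera", "action", "environment", "appearance", "subject"]

def infer_concept_category_py_alt (phrase_words : List String) : String :=
  let counts : PySem.Dict String Int :=
    (PySem.Set.ofList phrase_words).foldl (fun d w =>
      match pvIndex.get? w with
      | some cat => d.insert cat (d.getD cat 0 + 1)
      | none => d) PySem.Dict.empty
  -- max(_CHOICES, key=…): first extremal element; _CHOICES is a nonempty literal, so the
  -- getD "general" default is only a totality guard, never taken
  (PySem.List.max? pvChoices (fun c => counts.getD c 0)).getD "general"

-- ===== PRECONDITION & SPEC =====
def Spec_infer_concept_category_py (phrase_words : List String) (out : String) : Prop := out = infer_concept_category_py_alt phrase_words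
instance (phrase_words : List String) (out : String) : Decidable (Spec_infer_concept_category_py phrase_words out) := by unfold Spec_infer_concept_category_py; infer_instance

-- ===== CLAIM (what is proved, stated in full; the proofs are below) =====
def Claim_equal_infer_concept_category_py : Prop := ∀ (phrase_words : List String), Dom_infer_concept_category_py phrase_words → Spec_infer_concept_category_py phrase_words (infer_concept_category_py phrase_words)

-- ===== LEMMAS AND PROOFS =====

-- B's counting loop and its per-category read-off
def pvCounts (ws : List String) : PySem.Dict String Int :=
  ws.foldl (fun d w =>
    match pvIndex.get? w with
    | some cat => d.insert cat (d.getD cat 0 + 1)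
    | none => d) PySem.Dict.empty

def pvCnt (ws : List String) (c : String) : Int := (pvCounts ws).getD c 0

set_option maxRecDepth 100000 in
lemma pvIndex_items : pvIndex.items = pvIndexPairs := by decide

set_option maxRecDepth 100000 in
lemma pvIndex_keys_nodup : pvIndex.keys.Nodup := by decide

-- lookup in the reverse index = membership of the pair in the flat pair list
lemma pvIndex_get (w c : String) : pvIndex.get? w = some c ↔ (w, c) ∈ pvIndexPairs := by
  rw [PySem.Dict.get?_eq_some_iff_mem_items _ _ _ pvIndex_keys_nodup, pvIndex_items]

-- the counting loop of B, characterised per category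
lemma counts_getD (l : List String) (d : PySem.Dict String Int) (c : String) :
    (l.foldl (fun d w =>
      match pvIndex.get? w with
      | some cat => d.insert cat (d.getD cat 0 + 1)
      | none => d) d).getD c 0
      = d.getD c 0 + (l.countP (fun w => pvIndex.get? w == some c) : Int) := by
  induction l generalizing d with
  | nil => simp
  | cons w l ih =>
    rcases h : pvIndex.get? w with _ | cat
    · simp [h, ih]
    · by_cases hc : c = cat
      · subst hc
        simp [h, ih]
        omega
      · simp [h, ih, PySem.Dict.getD_insert, hc, Ne.symm hc]

-- no term maps to "general"
lemma cnt_general (ws : List String) : pvCnt ws "general" = 0 := by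
  have hp : ∀ w, (pvIndex.get? w == some "general") = false := by
    intro w
    rcases h : (pvIndex.get? w == some "general") with _ | _
    · rfl
    · exfalso
      have : pvIndex.get? w = some "general" := by simpa using h
      rw [pvIndex_get] at this
      simp [pvIndexPairs, Prod.ext_iff] at this
  have := counts_getD ws PySem.Dict.empty "general"
  simp [pvCnt, pvCounts, this, List.countP_eq_length_filter, List.filter_congr (fun w _ => hp w)]

-- per category: B's count predicate agrees with membership in that category's terms
lemma pred_eq (p : String × List String) (hp : p ∈ pvCategoryTerms) (w : String) :
    (pvIndex.get? w == some p.1) = p.2.contains w := by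
  have : pvIndex.get? w = some p.1 ↔ w ∈ p.2 := by
    rw [pvIndex_get]
    fin_cases hp <;>
      simp [pvIndexPairs, Prod.ext_iff]
  rcases hb : p.2.contains w with _ | _ <;>
    rcases hg : (pvIndex.get? w == some p.1) with _ | _ <;> simp_all

-- B's count per category = A's intersection score, for any deduped word list
lemma score_eq (ws : List String) (p : String × List String) (hp : p ∈ pvCategoryTerms) :
    pvCnt ws p.1 = ((PySem.Set.inter ws p.2).length : Int) := by
  unfold pvCnt pvCounts
  rw [counts_getD]
  have h1 : ws.countP (fun w => pvIndex.get? w == some p.1)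
      = ws.countP (fun w => p.2.contains w) :=
    List.countP_congr (fun w _ => by rw [pred_eq p hp w])
  simp [PySem.Set.inter, h1, List.countP_eq_length_filter]

-- A's pair-valued fold, projected to the name, equals a plain first-strict-max fold over the names
lemma bridge (ws : List String) (L : List (String × List String))
    (hL : ∀ p ∈ L, p ∈ pvCategoryTerms) (n : String) :
    (L.foldl (fun (b : String × Int) p =>
        let score : Int := ((PySem.Set.inter ws p.2).length : Int)
        if score > b.2 then (p.1, score) else b) (n, pvCnt ws n)).1
    = L.foldl (fun m p => if pvCnt ws m < pvCnt ws p.1 then p.1 else m) n := by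
  induction L generalizing n with
  | nil => rfl
  | cons p L ih =>
    have hs : ((PySem.Set.inter ws p.2).length : Int) = pvCnt ws p.1 :=
      (score_eq ws p (hL p (by simp))).symm
    have hL' : ∀ q ∈ L, q ∈ pvCategoryTerms := fun q hq => hL q (by simp [hq])
    simp only [List.foldl_cons, hs]
    by_cases h : pvCnt ws p.1 > pvCnt ws n
    · simp only [if_pos h]
      exact ih hL' p.1
    · simp only [if_neg h]
      exact ih hL' n

-- PySem.List.max? on a nonempty list is the plain first-strict-max fold seeded with the head
lemma max?_cons (key : String → Int) (l : List String) : ∀ x,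
    PySem.List.max? (x :: l) key = some (l.foldl (fun m y => if key m < key y then y else m) x) := by
  induction l with
  | nil => intro x; rfl
  | cons y l ih =>
    intro x
    have h1 : PySem.List.max? (x :: y :: l) key
        = PySem.List.max? ((if key x < key y then y else x) :: l) key := by
      unfold PySem.List.max?
      simp only [List.foldl_cons]
      by_cases h : key x < key y <;> simp [h]
    rw [h1, ih]
    simp only [List.foldl_cons]

-- B unfolded to the plain first-strict-max fold over the category names
lemma alt_eq (phrase_words : List String) :
    infer_concept_category_py_alt phrase_words
    = (pvCategoryTerms.map Prod.fst).foldl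
        (fun m c => if pvCnt (PySem.Set.ofList phrase_words) m
                        < pvCnt (PySem.Set.ofList phrase_words) c then c else m) "general" := by
  unfold infer_concept_category_py_alt
  have hch : pvChoices = "general" :: pvCategoryTerms.map Prod.fst := by decide
  show (PySem.List.max? pvChoices (fun c => pvCnt (PySem.Set.ofList phrase_words) c)).getD "general" = _
  rw [hch, max?_cons]
  rfl

-- ===== VERDICT (by name: the statement is the Claim_ definition above) =====
set_option maxRecDepth 100000 in
theorem infer_concept_category_py_spec : Claim_equal_infer_concept_category_py := by
  intro phrase_words _
  show infer_concept_category_py phrase_words = infer_concept_category_py_alt phrase_words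
  rw [alt_eq]
  unfold infer_concept_category_py
  rcases he : (PySem.Set.ofList phrase_words).isEmpty with _ | _
  · -- nonempty distinct-word list: both sides are the same first-strict-max fold
    simp only [he, Bool.false_eq_true, if_false]
    have h0 : (0 : Int) = pvCnt (PySem.Set.ofList phrase_words) "general" :=
      (cnt_general _).symm
    rw [h0, bridge (PySem.Set.ofList phrase_words) pvCategoryTerms (fun p hp => hp) "general"]
    rw [List.foldl_map]
  · -- no distinct words: phrase_words = [] and both sides are "general"
    have : phrase_words = [] := by
      rcases phrase_words with _ | ⟨w, l⟩
      · rfl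
      · exfalso
        have hw : w ∈ PySem.Set.ofList (w :: l) := by
          rw [PySem.Set.mem_ofList]; simp
        rw [List.isEmpty_iff] at he
        simp [he] at hw
    subst this
    decide
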